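-- pv_equiv track=rewrite | github.com/24prady02/Personalized_Learning_New | src/teaching/teaching_engine.py | _simplify_for_beginner
-- ===== SOURCE A (Python) =====
-- def _simplify_for_beginner(text: str) -> str:
--     """Simplify technical language for beginners"""
--
--     simplifications = {
--         "terminating condition": "stopping point",
--         "recursive invocation": "calling itself again",
--         "stack overflow": "too many function calls",
--         "computational complexity": "how fast the code runs"
--     }
--
--     simplified = text
--     for technical, simple in simplifications.items():
--         simplified = simplified.replace(technical, simple)
--
--     return simplified
-- ===== SOURCE B (Python) =====
-- def _simplify_for_beginner(text: str) -> str: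
--     """Simplify technical language for beginners"""
--
--     phrases = [
--         ("terminating condition", "stopping point"),
--         ("recursive invocation", "calling itself again"),
--         ("stack overflow", "too many function calls"),
--         ("computational complexity", "how fast the code runs"),
--     ]
--
--     out = []
--     i = 0
--     n = len(text)
--     while i < n:
--         for technical, simple in phrases:
--             if text.startswith(technical, i):
--                 out.append(simple)
--                 i += len(technical)
--                 break
--         else:
--             out.append(text[i])
--             i += 1
--     return "".join(out)
-- ===== Notes on version B (the rewrite author's own statement) =====
-- stated objective: alternative
-- what changed: A runs four sequential full-text str.replace passes (one per phrase); B makes a single left-to-right scan of the text that at each position matches whichever phrase occurs (in dict order) and otherwise copies one character.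
import Mathlib
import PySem

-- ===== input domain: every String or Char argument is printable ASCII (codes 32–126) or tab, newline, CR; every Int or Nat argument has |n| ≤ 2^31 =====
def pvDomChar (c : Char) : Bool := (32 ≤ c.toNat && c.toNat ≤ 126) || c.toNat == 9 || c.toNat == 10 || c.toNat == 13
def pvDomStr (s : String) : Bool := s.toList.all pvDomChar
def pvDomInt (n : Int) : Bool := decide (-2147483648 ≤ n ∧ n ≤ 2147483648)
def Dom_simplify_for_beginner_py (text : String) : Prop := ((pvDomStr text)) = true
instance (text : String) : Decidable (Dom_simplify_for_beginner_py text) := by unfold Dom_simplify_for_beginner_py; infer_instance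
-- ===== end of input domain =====

-- B replaces A's four sequential full-text replace passes by one left-to-right scan that
-- matches whichever phrase occurs at the current position (objective: alternative).


-- ===== PORT A =====
-- the dict literal of A
def pvSimplifications : PySem.Dict String String := PySem.Dict.ofList
  [("terminating condition", "stopping point"),
   ("recursive invocation", "calling itself again"),
   ("stack overflow", "too many function calls"),
   ("computational complexity", "how fast the code runs")]

def simplify_for_beginner_py (text : String) : String :=
  pvSimplifications.items.foldl
    (fun simplified kv => PySem.Str.replace simplified kv.1 kv.2) text

-- ===== PORT B =====
-- the four (technical, simple) pairs of B's dict, as char lists (B scans the text once)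
def pvK1 : List Char := "terminating condition".toList
def pvV1 : List Char := "stopping point".toList
def pvK2 : List Char := "recursive invocation".toList
def pvV2 : List Char := "calling itself again".toList
def pvK3 : List Char := "stack overflow".toList
def pvV3 : List Char := "too many function calls".toList
def pvK4 : List Char := "computational complexity".toList
def pvV4 : List Char := "how fast the code runs".toList

theorem pvK1_len : pvK1.length = 21 := by decide
theorem pvK2_len : pvK2.length = 20 := by decide
theorem pvK3_len : pvK3.length = 14 := by decide
theorem pvK4_len : pvK4.length = 24 := by decide

-- B's while loop: at each position try the four phrases in dict order, else copy one char
def pvScanGo : List Char → List Char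
  | [] => []
  | c :: t =>
    if pvK1.isPrefixOf (c :: t) then pvV1 ++ pvScanGo ((c :: t).drop pvK1.length)
    else if pvK2.isPrefixOf (c :: t) then pvV2 ++ pvScanGo ((c :: t).drop pvK2.length)
    else if pvK3.isPrefixOf (c :: t) then pvV3 ++ pvScanGo ((c :: t).drop pvK3.length)
    else if pvK4.isPrefixOf (c :: t) then pvV4 ++ pvScanGo ((c :: t).drop pvK4.length)
    else c :: pvScanGo t
termination_by l => l.length
decreasing_by
  all_goals simp [List.length_drop, pvK1_len, pvK2_len, pvK3_len, pvK4_len]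

def simplify_for_beginner_py_alt (text : String) : String :=
  String.ofList (pvScanGo text.toList)

-- ===== PRECONDITION & SPEC =====
def Spec_simplify_for_beginner_py (text : String) (out : String) : Prop := out = simplify_for_beginner_py_alt text
instance (text : String) (out : String) : Decidable (Spec_simplify_for_beginner_py text out) := by unfold Spec_simplify_for_beginner_py; infer_instance

-- ===== CLAIM (what is proved, stated in full; the proofs are below) =====
def Claim_equal_simplify_for_beginner_py : Prop := ∀ (text : String), Dom_simplify_for_beginner_py text → Spec_simplify_for_beginner_py text (simplify_for_beginner_py text)

-- ===== LEMMAS AND PROOFS =====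

-- a simple fuel-free recursion equivalent to PySem.Chars.replace for a nonempty pattern
def pvRepl (old new : List Char) : List Char → List Char
  | [] => []
  | c :: t =>
    if old.isPrefixOf (c :: t) then new ++ pvRepl old new (t.drop (old.length - 1))
    else c :: pvRepl old new t
termination_by l => l.length
decreasing_by
  all_goals simp [List.length_drop]

theorem pvGo_spec (old new : List Char) (hk : old ≠ []) :
    ∀ (fuel : Nat) (l acc : List Char), l.length ≤ fuel →
      PySem.Chars.replace.go old new fuel l acc = acc.reverse ++ pvRepl old new l := by
  intro fuel
  induction fuel with
  | zero =>
    intro l acc hl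
    have : l = [] := List.eq_nil_of_length_eq_zero (Nat.le_zero.mp hl)
    subst this
    simp [PySem.Chars.replace.go, pvRepl]
  | succ n ih =>
    intro l acc hl
    match l with
    | [] => simp [PySem.Chars.replace.go, pvRepl]
    | c :: t =>
      by_cases h : old.isPrefixOf (c :: t)
      · have hdrop : (c :: t).drop old.length = t.drop (old.length - 1) := by
          obtain ⟨o, os, rfl⟩ : ∃ o os, old = o :: os := by
            cases old with
            | nil => exact absurd rfl hk
            | cons o os => exact ⟨o, os, rfl⟩
          simp
        have hlen : ((c :: t).drop old.length).length ≤ n := by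
          have h1 : 1 ≤ old.length := by
            cases old with
            | nil => exact absurd rfl hk
            | cons _ _ => simp
          simp only [List.length_drop, List.length_cons]
          simp at hl
          omega
        rw [show PySem.Chars.replace.go old new (n+1) (c :: t) acc
              = PySem.Chars.replace.go old new n ((c :: t).drop old.length) (new.reverse ++ acc) by
            simp [PySem.Chars.replace.go, h]]
        rw [ih _ _ hlen]
        simp [pvRepl, h, hdrop]
      · rw [show PySem.Chars.replace.go old new (n+1) (c :: t) acc
              = PySem.Chars.replace.go old new n t (c :: acc) by
            simp [PySem.Chars.replace.go, h]]
        rw [ih t (c :: acc) (by simp at hl; omega)]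
        simp [pvRepl, h]

theorem pvReplace_eq (old new s : List Char) (hk : old ≠ []) :
    PySem.Chars.replace s old new = pvRepl old new s := by
  unfold PySem.Chars.replace
  rw [if_neg (by simpa [List.isEmpty_iff] using hk)]
  simpa using pvGo_spec old new hk s.length s [] le_rfl

-- a phrase fires when it sits at the front
theorem pvRepl_fire (k w : List Char) (hk : k ≠ []) (X : List Char) :
    pvRepl k w (k ++ X) = w ++ pvRepl k w X := by
  obtain ⟨c, t, rfl⟩ : ∃ c t, k = c :: t := by
    cases k with
    | nil => exact absurd rfl hk
    | cons c t => exact ⟨c, t, rfl⟩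
  rw [show (c :: t) ++ X = c :: (t ++ X) by simp]
  rw [show pvRepl (c :: t) w (c :: (t ++ X))
        = if (c :: t).isPrefixOf (c :: (t ++ X)) then w ++ pvRepl (c :: t) w ((t ++ X).drop ((c :: t).length - 1))
          else c :: pvRepl (c :: t) w (t ++ X) by simp [pvRepl]]
  rw [if_pos (by rw [List.isPrefixOf_iff_prefix]; exact ⟨X, by simp⟩)]
  simp

-- separation: no nonempty suffix of a is prefix-comparable with k
def pvSepB (a k : List Char) : Bool :=
  a.tails.all (fun s => s.isEmpty || (!(s.isPrefixOf k) && !(k.isPrefixOf s)))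

theorem pvSepB_spec {a k : List Char} (h : pvSepB a k = true) :
    ∀ s, s <:+ a → s ≠ [] → ¬ s <+: k ∧ ¬ k <+: s := by
  intro s hs hne
  have := (List.all_eq_true.mp h) s ((List.mem_tails _ _).mpr hs)
  simp only [Bool.or_eq_true, Bool.and_eq_true, Bool.not_eq_true',
    List.isEmpty_iff] at this
  rcases this with h1 | ⟨h2, h3⟩
  · exact absurd h1 hne
  · constructor
    · intro hp; rw [← List.isPrefixOf_iff_prefix] at hp; simp [hp] at h2
    · intro hp; rw [← List.isPrefixOf_iff_prefix] at hp; simp [hp] at h3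

-- a region separated from k passes unchanged through pvRepl k w
theorem pvRepl_pass (k w : List Char) (_hk : k ≠ []) :
    ∀ (a : List Char), (∀ s, s <:+ a → s ≠ [] → ¬ s <+: k ∧ ¬ k <+: s) →
      ∀ X, pvRepl k w (a ++ X) = a ++ pvRepl k w X := by
  intro a
  induction a with
  | nil => intro _ X; simp
  | cons c a' ih =>
    intro ha X
    have hnot : ¬ k.isPrefixOf (c :: (a' ++ X)) := by
      rw [List.isPrefixOf_iff_prefix]
      intro hkp
      have hsfx := ha (c :: a') (List.suffix_refl _) (by simp)
      have hpa : (c :: a') <+: (c :: a') ++ X := List.prefix_append _ _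
      rw [show c :: (a' ++ X) = (c :: a') ++ X by simp] at hkp
      by_cases hle : k.length ≤ (c :: a').length
      · exact hsfx.2 (List.prefix_of_prefix_length_le hkp hpa hle)
      · exact hsfx.1 (List.prefix_of_prefix_length_le hpa hkp (by omega))
    rw [show (c :: a') ++ X = c :: (a' ++ X) by simp]
    rw [show pvRepl k w (c :: (a' ++ X))
          = if k.isPrefixOf (c :: (a' ++ X)) then w ++ pvRepl k w ((a' ++ X).drop (k.length - 1))
            else c :: pvRepl k w (a' ++ X) by simp [pvRepl]]
    rw [if_neg hnot, ih (fun s hs hne => ha s (hs.trans (List.suffix_cons _ _)) hne) X]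
    simp

-- a list separated from w cannot become a prefix of pvRepl k w m unless it was a prefix of m
theorem pvRepl_prefix (k w : List Char) (_hk : k ≠ []) :
    ∀ (n : Nat) (m t : List Char), m.length ≤ n →
      (∀ s, s <:+ t → s ≠ [] → ¬ s <+: w ∧ ¬ w <+: s) →
      t <+: pvRepl k w m → t <+: m := by
  intro n
  induction n with
  | zero =>
    intro m t hm _ hp
    have : m = [] := List.eq_nil_of_length_eq_zero (Nat.le_zero.mp hm)
    subst this
    simpa [pvRepl] using hp
  | succ n ih =>
    intro m t hm ht hp
    match m with
    | [] => simpa [pvRepl] using hp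
    | c :: m' =>
      by_cases h : k.isPrefixOf (c :: m')
      · rw [show pvRepl k w (c :: m') = w ++ pvRepl k w (m'.drop (k.length - 1)) by
            simp [pvRepl, h]] at hp
        match t with
        | [] => exact List.nil_prefix
        | c' :: t' =>
          exfalso
          have hsfx := ht (c' :: t') (List.suffix_refl _) (by simp)
          have hwp : w <+: w ++ pvRepl k w (m'.drop (k.length - 1)) := List.prefix_append _ _
          by_cases hle : (c' :: t').length ≤ w.length
          · exact hsfx.1 (List.prefix_of_prefix_length_le hp hwp hle)
          · exact hsfx.2 (List.prefix_of_prefix_length_le hwp hp (by omega))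
      · rw [show pvRepl k w (c :: m') = c :: pvRepl k w m' by simp [pvRepl, h]] at hp
        match t with
        | [] => exact List.nil_prefix
        | c' :: t' =>
          rw [List.cons_prefix_cons] at hp ⊢
          refine ⟨hp.1, ih m' t' (by simp at hm; omega)
            (fun s hs hne => ht s (hs.trans (List.suffix_cons _ _)) hne) hp.2⟩

-- abbreviations for the four replace passes
-- (helper only for the proofs below)
theorem pvPrefix_split {k l : List Char} (h : k <+: l) :
    l = k ++ l.drop k.length := by
  obtain ⟨u, rfl⟩ := h
  simp

-- replacing inside the tail cannot create a new match of a separated phrase at the front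
theorem pvNoNew (k w : List Char) (hk' : k ≠ []) (kj m : List Char) (c : Char)
    (hsep : ∀ s, s <:+ kj.drop 1 → s ≠ [] → ¬ s <+: w ∧ ¬ w <+: s)
    (h : ¬ kj.isPrefixOf (c :: m)) :
    ¬ kj.isPrefixOf (c :: pvRepl k w m) := by
  intro hcon
  apply h
  rw [List.isPrefixOf_iff_prefix] at hcon ⊢
  match kj, hcon, hsep with
  | [], _, _ => exact List.nil_prefix
  | c' :: kj', hcon, hsep =>
    rw [List.cons_prefix_cons] at hcon ⊢
    exact ⟨hcon.1, pvRepl_prefix k w hk' m.length m kj' le_rfl (by simpa using hsep) hcon.2⟩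

theorem pvMain : ∀ (n : Nat) (l : List Char), l.length ≤ n →
    pvRepl pvK4 pvV4 (pvRepl pvK3 pvV3 (pvRepl pvK2 pvV2 (pvRepl pvK1 pvV1 l))) = pvScanGo l := by
  intro n
  induction n with
  | zero =>
    intro l hl
    have : l = [] := List.eq_nil_of_length_eq_zero (Nat.le_zero.mp hl)
    subst this
    simp [pvRepl, pvScanGo]
  | succ n ih =>
    intro l hl
    match l with
    | [] => simp [pvRepl, pvScanGo]
    | c :: t =>
      simp only [List.length_cons] at hl
      by_cases h1 : pvK1.isPrefixOf (c :: t)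
      · have h1p := List.isPrefixOf_iff_prefix.mp h1
        have hsplit := pvPrefix_split h1p
        have hrest : ((c :: t).drop pvK1.length).length ≤ n := by
          simp only [List.length_drop, List.length_cons, pvK1_len]; omega
        calc pvRepl pvK4 pvV4 (pvRepl pvK3 pvV3 (pvRepl pvK2 pvV2 (pvRepl pvK1 pvV1 (c :: t))))
            = pvV1 ++ pvRepl pvK4 pvV4 (pvRepl pvK3 pvV3 (pvRepl pvK2 pvV2 (pvRepl pvK1 pvV1 ((c :: t).drop pvK1.length)))) := by
              rw [show (c :: t) = pvK1 ++ (c :: t).drop pvK1.length from hsplit]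
              rw [pvRepl_fire _ _ (by decide) _]
              rw [pvRepl_pass pvK2 pvV2 (by decide) pvV1 (pvSepB_spec (by decide)) _]
              rw [pvRepl_pass pvK3 pvV3 (by decide) pvV1 (pvSepB_spec (by decide)) _]
              rw [pvRepl_pass pvK4 pvV4 (by decide) pvV1 (pvSepB_spec (by decide)) _]
              simp [pvK1_len]
          _ = pvScanGo (c :: t) := by
              rw [show pvScanGo (c :: t) = pvV1 ++ pvScanGo ((c :: t).drop pvK1.length) by
                simp [pvScanGo, h1]]
              rw [ih _ hrest]
      · by_cases h2 : pvK2.isPrefixOf (c :: t)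
        · have h2p := List.isPrefixOf_iff_prefix.mp h2
          have hsplit := pvPrefix_split h2p
          have hrest : ((c :: t).drop pvK2.length).length ≤ n := by
            simp only [List.length_drop, List.length_cons, pvK2_len]; omega
          calc pvRepl pvK4 pvV4 (pvRepl pvK3 pvV3 (pvRepl pvK2 pvV2 (pvRepl pvK1 pvV1 (c :: t))))
              = pvV2 ++ pvRepl pvK4 pvV4 (pvRepl pvK3 pvV3 (pvRepl pvK2 pvV2 (pvRepl pvK1 pvV1 ((c :: t).drop pvK2.length)))) := by
                rw [show (c :: t) = pvK2 ++ (c :: t).drop pvK2.length from hsplit]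
                rw [pvRepl_pass pvK1 pvV1 (by decide) pvK2 (pvSepB_spec (by decide)) _]
                rw [pvRepl_fire _ _ (by decide) _]
                rw [pvRepl_pass pvK3 pvV3 (by decide) pvV2 (pvSepB_spec (by decide)) _]
                rw [pvRepl_pass pvK4 pvV4 (by decide) pvV2 (pvSepB_spec (by decide)) _]
                simp [pvK2_len]
            _ = pvScanGo (c :: t) := by
                rw [show pvScanGo (c :: t) = pvV2 ++ pvScanGo ((c :: t).drop pvK2.length) by
                  simp [pvScanGo, h1, h2]]
                rw [ih _ hrest]
        · by_cases h3 : pvK3.isPrefixOf (c :: t)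
          · have h3p := List.isPrefixOf_iff_prefix.mp h3
            have hsplit := pvPrefix_split h3p
            have hrest : ((c :: t).drop pvK3.length).length ≤ n := by
              simp only [List.length_drop, List.length_cons, pvK3_len]; omega
            calc pvRepl pvK4 pvV4 (pvRepl pvK3 pvV3 (pvRepl pvK2 pvV2 (pvRepl pvK1 pvV1 (c :: t))))
                = pvV3 ++ pvRepl pvK4 pvV4 (pvRepl pvK3 pvV3 (pvRepl pvK2 pvV2 (pvRepl pvK1 pvV1 ((c :: t).drop pvK3.length)))) := by
                  rw [show (c :: t) = pvK3 ++ (c :: t).drop pvK3.length from hsplit]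
                  rw [pvRepl_pass pvK1 pvV1 (by decide) pvK3 (pvSepB_spec (by decide)) _]
                  rw [pvRepl_pass pvK2 pvV2 (by decide) pvK3 (pvSepB_spec (by decide)) _]
                  rw [pvRepl_fire _ _ (by decide) _]
                  rw [pvRepl_pass pvK4 pvV4 (by decide) pvV3 (pvSepB_spec (by decide)) _]
                  simp [pvK3_len]
              _ = pvScanGo (c :: t) := by
                  rw [show pvScanGo (c :: t) = pvV3 ++ pvScanGo ((c :: t).drop pvK3.length) by
                    simp [pvScanGo, h1, h2, h3]]
                  rw [ih _ hrest]
          · by_cases h4 : pvK4.isPrefixOf (c :: t)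
            · have h4p := List.isPrefixOf_iff_prefix.mp h4
              have hsplit := pvPrefix_split h4p
              have hrest : ((c :: t).drop pvK4.length).length ≤ n := by
                simp only [List.length_drop, List.length_cons, pvK4_len]; omega
              calc pvRepl pvK4 pvV4 (pvRepl pvK3 pvV3 (pvRepl pvK2 pvV2 (pvRepl pvK1 pvV1 (c :: t))))
                  = pvV4 ++ pvRepl pvK4 pvV4 (pvRepl pvK3 pvV3 (pvRepl pvK2 pvV2 (pvRepl pvK1 pvV1 ((c :: t).drop pvK4.length)))) := by
                    rw [show (c :: t) = pvK4 ++ (c :: t).drop pvK4.length from hsplit]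
                    rw [pvRepl_pass pvK1 pvV1 (by decide) pvK4 (pvSepB_spec (by decide)) _]
                    rw [pvRepl_pass pvK2 pvV2 (by decide) pvK4 (pvSepB_spec (by decide)) _]
                    rw [pvRepl_pass pvK3 pvV3 (by decide) pvK4 (pvSepB_spec (by decide)) _]
                    rw [pvRepl_fire _ _ (by decide) _]
                    simp [pvK4_len]
                _ = pvScanGo (c :: t) := by
                    rw [show pvScanGo (c :: t) = pvV4 ++ pvScanGo ((c :: t).drop pvK4.length) by
                      simp [pvScanGo, h1, h2, h3, h4]]
                    rw [ih _ hrest]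
            · -- no phrase at the front: one character passes through all four replaces
              have h2a := pvNoNew pvK1 pvV1 (by decide) pvK2 t c (pvSepB_spec (by decide)) h2
              have h3a := pvNoNew pvK1 pvV1 (by decide) pvK3 t c (pvSepB_spec (by decide)) h3
              have h3b := pvNoNew pvK2 pvV2 (by decide) pvK3 (pvRepl pvK1 pvV1 t) c (pvSepB_spec (by decide)) h3a
              have h4a := pvNoNew pvK1 pvV1 (by decide) pvK4 t c (pvSepB_spec (by decide)) h4
              have h4b := pvNoNew pvK2 pvV2 (by decide) pvK4 (pvRepl pvK1 pvV1 t) c (pvSepB_spec (by decide)) h4a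
              have h4c := pvNoNew pvK3 pvV3 (by decide) pvK4 (pvRepl pvK2 pvV2 (pvRepl pvK1 pvV1 t)) c (pvSepB_spec (by decide)) h4b
              have step1 : pvRepl pvK1 pvV1 (c :: t) = c :: pvRepl pvK1 pvV1 t := by
                simp [pvRepl, h1]
              have step2 : pvRepl pvK2 pvV2 (c :: pvRepl pvK1 pvV1 t)
                  = c :: pvRepl pvK2 pvV2 (pvRepl pvK1 pvV1 t) := by
                simp [pvRepl, h2a]
              have step3 : pvRepl pvK3 pvV3 (c :: pvRepl pvK2 pvV2 (pvRepl pvK1 pvV1 t))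
                  = c :: pvRepl pvK3 pvV3 (pvRepl pvK2 pvV2 (pvRepl pvK1 pvV1 t)) := by
                simp [pvRepl, h3b]
              have step4 : pvRepl pvK4 pvV4 (c :: pvRepl pvK3 pvV3 (pvRepl pvK2 pvV2 (pvRepl pvK1 pvV1 t)))
                  = c :: pvRepl pvK4 pvV4 (pvRepl pvK3 pvV3 (pvRepl pvK2 pvV2 (pvRepl pvK1 pvV1 t))) := by
                simp [pvRepl, h4c]
              rw [step1, step2, step3, step4]
              rw [show pvScanGo (c :: t) = c :: pvScanGo t by simp [pvScanGo, h1, h2, h3, h4]]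
              rw [ih t (by omega)]

theorem pvItems : pvSimplifications.items =
    [("terminating condition", "stopping point"),
     ("recursive invocation", "calling itself again"),
     ("stack overflow", "too many function calls"),
     ("computational complexity", "how fast the code runs")] := by rfl

theorem pvStrRepl (s o n : String) (h : o.toList ≠ []) :
    PySem.Str.replace s o n = String.ofList (pvRepl o.toList n.toList s.toList) := by
  unfold PySem.Str.replace
  rw [pvReplace_eq _ _ _ h]

theorem pvPortA_eq (text : String) :
    simplify_for_beginner_py text
      = String.ofList (pvRepl pvK4 pvV4 (pvRepl pvK3 pvV3 (pvRepl pvK2 pvV2 (pvRepl pvK1 pvV1 text.toList)))) := by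
  unfold simplify_for_beginner_py
  rw [pvItems]
  simp only [List.foldl]
  rw [pvStrRepl text "terminating condition" "stopping point" (by decide),
      pvStrRepl _ "recursive invocation" "calling itself again" (by decide),
      pvStrRepl _ "stack overflow" "too many function calls" (by decide),
      pvStrRepl _ "computational complexity" "how fast the code runs" (by decide)]
  simp only [String.toList_ofList]
  rfl

-- ===== VERDICT (by name: the statement is the Claim_ definition above) =====
theorem simplify_for_beginner_py_spec : Claim_equal_simplify_for_beginner_py := by
  intro text _
  unfold Spec_simplify_for_beginner_py
  rw [pvPortA_eq, simplify_for_beginner_py_alt]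
  rw [pvMain text.toList.length text.toList le_rfl]
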